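-- pv_equiv track=rewrite | github.com/cry999/AtCoder | beginner/045/C.py | dfs
-- ===== SOURCE A (Python) =====
-- def dfs(nums: list) -> int:
--     if len(nums) == 1:
--         return nums[0]
--
--     # + を先頭の数字の後ろに入れる
--     n1 = nums[0] * (1 << (len(nums) - 2)) + dfs(nums[1:])
--
--     # + をいれない。
--     headless = nums[1:]
--     headless[0] += nums[0] * 10
--     n2 = dfs(headless)
--
--     return n1 + n2
-- ===== SOURCE B (Python) =====
-- def dfs(nums: list) -> int:
--     # Closed form: each element contributes times a positional coefficient
--     # counting all '+'-placements; O(n^2) instead of A's O(2^n) recursion.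
--     n = len(nums)
--     total = 0
--     for i, v in enumerate(nums):
--         c = 10 ** (n - 1 - i) * 2 ** i
--         for d in range(n - 1 - i):
--             c += 10 ** d * 2 ** (n - 2 - d)
--         total += v * c
--     return total
-- ===== Notes on version B (the rewrite author's own statement) =====
-- stated objective: faster
-- what changed: Replaced A's exponential branching recursion over all '+'-placements by a closed form: each element is multiplied by a positional coefficient summing 10^d * 2^(free gaps) over the possible block lengths, computed with two nested loops.
import Mathlib
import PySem

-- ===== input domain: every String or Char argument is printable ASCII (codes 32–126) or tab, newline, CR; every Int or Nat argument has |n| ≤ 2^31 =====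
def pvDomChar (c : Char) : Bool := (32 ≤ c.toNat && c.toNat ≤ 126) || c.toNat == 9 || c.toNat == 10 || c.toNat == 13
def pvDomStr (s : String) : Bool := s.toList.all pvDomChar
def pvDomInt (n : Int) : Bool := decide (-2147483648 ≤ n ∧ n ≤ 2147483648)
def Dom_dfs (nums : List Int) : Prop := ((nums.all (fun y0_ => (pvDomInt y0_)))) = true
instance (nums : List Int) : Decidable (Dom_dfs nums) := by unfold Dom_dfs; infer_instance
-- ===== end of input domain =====

-- B replaces A's exponential recursion by an O(n^2) closed-form coefficient sum (timing: asymptotic speed-up).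

-- ===== PORT A =====
def dfs (nums : List Int) : Int :=
  match nums with
  | [] => 0  -- Python raises IndexError here (nums[0] on []); excluded by Pre_dfs
  | [x] => x
  | x :: y :: rest =>
    let n1 := x * (((1 <<< ((x :: y :: rest).length - 2)) : Nat) : Int) + dfs (y :: rest)
    let headless := (y + x * 10) :: rest
    let n2 := dfs headless
    n1 + n2
termination_by nums.length
decreasing_by all_goals simp

-- ===== PORT B =====
def dfs_alt (nums : List Int) : Int :=
  let n : Int := nums.length
  (PySem.List.enumerate nums).foldl (fun total iv =>
    let c := (PySem.List.pyRange 0 (n - 1 - iv.1) 1).foldl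
      (fun c d => c + 10 ^ d.toNat * 2 ^ (n - 2 - d).toNat)
      ((10 : Int) ^ (n - 1 - iv.1).toNat * 2 ^ iv.1.toNat)
    total + iv.2 * c) 0

-- ===== PRECONDITION & SPEC =====
def Pre_dfs (nums : List Int) : Prop := nums ≠ []
instance (nums : List Int) : Decidable (Pre_dfs nums) := by unfold Pre_dfs; infer_instance
def pvWitness_dfs : List Int := ([1, 2, 5])
def Spec_dfs (nums : List Int) (out : Int) : Prop := out = dfs_alt nums
instance (nums : List Int) (out : Int) : Decidable (Spec_dfs nums out) := by unfold Spec_dfs; infer_instance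

-- ===== CLAIM (what is proved, stated in full; the proofs are below) =====
def Claim_equal_dfs : Prop := ∀ (nums : List Int), Dom_dfs nums → Pre_dfs nums → Spec_dfs nums (dfs nums)

-- ===== LEMMAS AND PROOFS =====

-- positional coefficient of element i in a list of n elements
def coefA (n i : Nat) : Int :=
  (∑ d ∈ Finset.range (n - 1 - i), (10 : Int) ^ d * 2 ^ (n - 2 - d)) + 10 ^ (n - 1 - i) * 2 ^ i

-- the closed form both ports are proved equal to
def S (l : List Int) : Int := ∑ i ∈ Finset.range l.length, l.getD i 0 * coefA l.length i

lemma coef_shift (n i : Nat) (h : i < n) : coefA (n + 1) (i + 1) = 2 * coefA n i := by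
  unfold coefA
  have e1 : n + 1 - 1 - (i + 1) = n - 1 - i := by omega
  rw [e1]
  have hsum : ∑ d ∈ Finset.range (n - 1 - i), (10 : Int) ^ d * 2 ^ (n + 1 - 2 - d)
      = ∑ d ∈ Finset.range (n - 1 - i), 2 * ((10 : Int) ^ d * 2 ^ (n - 2 - d)) := by
    apply Finset.sum_congr rfl
    intro d hd
    simp only [Finset.mem_range] at hd
    have e2 : n + 1 - 2 - d = (n - 2 - d) + 1 := by omega
    rw [e2, pow_succ]; ring
  rw [hsum, mul_add, ← Finset.mul_sum, pow_succ]; ring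

lemma coef_zero (m : Nat) : coefA (m + 1 + 1) 0 = 2 ^ m + 10 * coefA (m + 1) 0 := by
  unfold coefA
  simp only [Nat.sub_zero, pow_zero, mul_one, Nat.add_sub_cancel]
  rw [Finset.sum_range_succ']
  have hsum : ∑ d ∈ Finset.range m, (10 : Int) ^ (d + 1) * 2 ^ (m + 1 + 1 - 2 - (d + 1))
      = 10 * ∑ d ∈ Finset.range m, (10 : Int) ^ d * 2 ^ (m + 1 - 2 - d) := by
    rw [Finset.mul_sum]
    apply Finset.sum_congr rfl
    intro d hd
    simp only [Finset.mem_range] at hd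
    have e2 : m + 1 + 1 - 2 - (d + 1) = m + 1 - 2 - d := by omega
    rw [e2, pow_succ]; ring
  rw [hsum]
  have e3 : m + 1 + 1 - 2 - 0 = m := by omega
  rw [e3]
  have e4 : (10 : Int) ^ (m + 1) = 10 * 10 ^ m := by rw [pow_succ]; ring
  rw [e4]; ring

lemma S_cons (c : Int) (t : List Int) :
    S (c :: t) = (∑ i ∈ Finset.range t.length, t.getD i 0 * coefA (t.length + 1) (i + 1))
      + c * coefA (t.length + 1) 0 := by
  unfold S
  simp only [List.length_cons]
  rw [Finset.sum_range_succ']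
  simp

theorem dfs_eq_S (nums : List Int) : dfs nums = S nums := by
  match nums with
  | [] => simp [dfs, S]
  | [x] =>
    simp [dfs, S, coefA]
  | x :: y :: rest =>
    have h1 := dfs_eq_S (y :: rest)
    have h2 := dfs_eq_S ((y + x * 10) :: rest)
    rw [dfs, h1, h2]
    set m := rest.length with hm
    have hlen : (x :: y :: rest).length - 2 = m := by simp [hm]
    rw [hlen]
    have hpow : (((1 <<< m : Nat)) : Int) = 2 ^ m := by
      rw [Nat.shiftLeft_eq]; push_cast; ring
    rw [hpow]
    -- expand the three S's
    rw [S_cons x (y :: rest), S_cons y rest, S_cons (y + x * 10) rest]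
    simp only [List.length_cons]
    have hshift : ∑ i ∈ Finset.range (m + 1), (y :: rest).getD i 0 * coefA (m + 1 + 1) (i + 1)
        = 2 * ∑ i ∈ Finset.range (m + 1), (y :: rest).getD i 0 * coefA (m + 1) i := by
      rw [Finset.mul_sum]
      apply Finset.sum_congr rfl
      intro i hi
      simp only [Finset.mem_range] at hi
      rw [coef_shift (m + 1) i hi]; ring
    have hS : ∑ i ∈ Finset.range (m + 1), (y :: rest).getD i 0 * coefA (m + 1) i
        = (∑ i ∈ Finset.range m, rest.getD i 0 * coefA (m + 1) (i + 1)) + y * coefA (m + 1) 0 := by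
      rw [Finset.sum_range_succ']
      simp
    rw [hshift, hS, coef_zero m]
    ring
termination_by nums.length
decreasing_by all_goals simp

lemma sum_map_range_eq (f : Nat → Int) (n : Nat) :
    ((List.range n).map f).sum = ∑ i ∈ Finset.range n, f i := by
  induction n with
  | zero => simp
  | succ n ih => rw [List.range_succ, Finset.sum_range_succ, ← ih]; simp

theorem alt_eq_S (nums : List Int) : dfs_alt nums = S nums := by
  unfold dfs_alt S
  rw [PySem.List.enumerate_eq_map_pyRange (d := 0), List.foldl_map,
      PySem.List.foldl_add, PySem.List.pyRange_one, List.map_map, sum_map_range_eq]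
  simp only [Int.sub_zero, zero_add]
  apply Finset.sum_congr rfl
  intro k hk
  simp only [Finset.mem_range] at hk
  simp only [Function.comp]
  rw [PySem.List.foldl_add, PySem.List.pyRange_one, List.map_map, sum_map_range_eq]
  have hget : PySem.List.pyGetD nums (k : Int) 0 = nums.getD k 0 := by
    rw [PySem.List.pyGetD_natCast]
  have e1 : ((nums.length : Int) - 1 - (k : Int)).toNat = nums.length - 1 - k := by omega
  have e2 : ((nums.length : Int) - 1 - (k : Int) - 0).toNat = nums.length - 1 - k := by omega
  rw [hget, e1, e2]
  simp only [Function.comp_def, Int.toNat_natCast]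
  have hinner : ∑ i ∈ Finset.range (nums.length - 1 - k),
      (10 : Int) ^ ((0 : Int) + (i : Int)).toNat * 2 ^ ((nums.length : Int) - 2 - ((0 : Int) + (i : Int))).toNat
      = ∑ d ∈ Finset.range (nums.length - 1 - k), (10 : Int) ^ d * 2 ^ (nums.length - 2 - d) := by
    apply Finset.sum_congr rfl
    intro d hd
    simp only [Finset.mem_range] at hd
    have e3 : ((0 : Int) + (d : Int)).toNat = d := by omega
    have e4 : ((nums.length : Int) - 2 - ((0 : Int) + (d : Int))).toNat = nums.length - 2 - d := by omega
    rw [e3, e4]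
  rw [hinner]
  unfold coefA
  ring

-- ===== VERDICT (by name: the statement is the Claim_ definition above) =====
theorem dfs_spec : Claim_equal_dfs := by
  intro nums _ _
  unfold Spec_dfs
  rw [dfs_eq_S, alt_eq_S]
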